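-- pv_equiv track=rewrite | github.com/AkilM7/python | flames.py | remove_common_letters
-- ===== SOURCE A (Python) =====
-- def remove_common_letters(name1, name2):
--     list1 = list(name1)
--     list2 = list(name2)
--
--     for letter in list1[:]:
--         if letter in list2:
--             list1.remove(letter)
--             list2.remove(letter)
--
--     return list1 + list2
-- ===== SOURCE B (Python) =====
-- def remove_common_letters(name1, name2):
--     counts2 = {}
--     for ch in name2:
--         counts2[ch] = counts2.get(ch, 0) + 1
--     counts1 = {}
--     for ch in name1:
--         counts1[ch] = counts1.get(ch, 0) + 1
--     common = {}
--     for ch, n in counts1.items():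
--         common[ch] = min(n, counts2.get(ch, 0))
--     result = []
--     for name in (name1, name2):
--         drop = dict(common)
--         for ch in name:
--             if drop.get(ch, 0) > 0:
--                 drop[ch] = drop[ch] - 1
--             else:
--                 result.append(ch)
--     return result
-- ===== Notes on version B (the rewrite author's own statement) =====
-- stated objective: faster
-- what changed: Replaces A's repeated 'in'/list.remove scans with one counting pass per name: per-letter overlap counts are computed once, then each name is scanned linearly, skipping a letter while its drop budget is positive.
import Mathlib
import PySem

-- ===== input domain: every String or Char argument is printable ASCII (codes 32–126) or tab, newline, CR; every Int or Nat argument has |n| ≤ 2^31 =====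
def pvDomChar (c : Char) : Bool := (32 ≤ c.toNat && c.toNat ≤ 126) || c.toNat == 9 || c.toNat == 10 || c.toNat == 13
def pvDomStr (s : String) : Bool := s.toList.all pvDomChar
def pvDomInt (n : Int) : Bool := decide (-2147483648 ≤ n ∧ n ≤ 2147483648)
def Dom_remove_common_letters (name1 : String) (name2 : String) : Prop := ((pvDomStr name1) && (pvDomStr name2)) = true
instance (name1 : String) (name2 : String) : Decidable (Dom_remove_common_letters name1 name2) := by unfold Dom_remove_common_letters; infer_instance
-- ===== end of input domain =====

-- B replaces A's quadratic repeated in/remove scans with counting passes and linear drop-budget scans (objective: faster).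

-- ===== PORT A =====
def remove_common_letters (name1 : String) (name2 : String) : List String :=
  let list1 := name1.toList.map (fun c => String.ofList [c])
  let list2 := name2.toList.map (fun c => String.ofList [c])
  -- for letter in list1[:]: if letter in list2: list1.remove(letter); list2.remove(letter)
  let st := list1.foldl
    (fun (st : List String × List String) letter =>
      if letter ∈ st.2 then
        ((PySem.List.remove? st.1 letter).getD st.1,
         (PySem.List.remove? st.2 letter).getD st.2)
      else st)
    (list1, list2)
  st.1 ++ st.2

-- ===== PORT B =====
-- one counting pass over a name: counts[ch] = counts.get(ch, 0) + 1
def pvCountB (name : String) : PySem.Dict String Int :=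
  (name.toList.map (fun c => String.ofList [c])).foldl
    (fun d ch => d.insert ch (d.getD ch 0 + 1)) PySem.Dict.empty

-- for ch in name: skip while drop budget positive, else append
def pvPassB (common : PySem.Dict String Int) (name : String) (out : List String) :
    List String :=
  ((name.toList.map (fun c => String.ofList [c])).foldl
    (fun (st : PySem.Dict String Int × List String) ch =>
      if st.1.getD ch 0 > 0 then (st.1.insert ch (st.1.getD ch 0 - 1), st.2)
      else (st.1, st.2 ++ [ch]))
    (common, out)).2

def remove_common_letters_alt (name1 : String) (name2 : String) : List String :=
  let counts2 := pvCountB name2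
  let counts1 := pvCountB name1
  let common := counts1.items.foldl
    (fun (d : PySem.Dict String Int) p => d.insert p.1 (min p.2 (counts2.getD p.1 0)))
    PySem.Dict.empty
  pvPassB common name2 (pvPassB common name1 [])

-- ===== PRECONDITION & SPEC =====
def Spec_remove_common_letters (name1 : String) (name2 : String) (out : List String) : Prop := out = remove_common_letters_alt name1 name2
instance (name1 : String) (name2 : String) (out : List String) : Decidable (Spec_remove_common_letters name1 name2 out) := by unfold Spec_remove_common_letters; infer_instance

-- ===== CLAIM (what is proved, stated in full; the proofs are below) =====
def Claim_equal_remove_common_letters : Prop := ∀ (name1 : String) (name2 : String), Dom_remove_common_letters name1 name2 → Spec_remove_common_letters name1 name2 (remove_common_letters name1 name2)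

-- ===== LEMMAS AND PROOFS =====

-- reference: drop, for each ch, the first (d ch) occurrences of ch from the list
def dropCnt (d : String → Nat) : List String → List String
  | [] => []
  | x :: xs =>
      if d x = 0 then x :: dropCnt d xs
      else dropCnt (fun y => if y = x then d x - 1 else d y) xs

theorem dropCnt_nil (d : String → Nat) : dropCnt d [] = [] := rfl

theorem dropCnt_cons_zero {d : String → Nat} {x : String} (xs : List String)
    (h : d x = 0) : dropCnt d (x :: xs) = x :: dropCnt d xs := by
  simp [dropCnt, h]

theorem dropCnt_cons_pos {d : String → Nat} {x : String} (xs : List String)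
    (h : d x ≠ 0) :
    dropCnt d (x :: xs) = dropCnt (fun y => if y = x then d x - 1 else d y) xs := by
  simp [dropCnt, h]

theorem dropCnt_congr (d d' : String → Nat) (l : List String) (h : d = d') :
    dropCnt d l = dropCnt d' l := by rw [h]

theorem count_dropCnt (l : List String) : ∀ (d : String → Nat) (x : String),
    (dropCnt d l).count x = l.count x - d x := by
  induction l with
  | nil => intro d x; simp [dropCnt_nil]
  | cons a xs ih =>
    intro d x
    by_cases h : d a = 0
    · rw [dropCnt_cons_zero xs h, List.count_cons, List.count_cons, ih]
      by_cases hx : a = x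
      · subst hx; simp [h]
      · simp [hx]
    · rw [dropCnt_cons_pos xs h, ih, List.count_cons]
      by_cases hx : x = a
      · subst hx
        simp only [beq_self_eq_true, if_true]
        omega
      · have hb : (a == x) = false := beq_false_of_ne (Ne.symm hx)
        simp only [if_neg hx, hb, Bool.false_eq_true, if_false]
        omega

theorem mem_dropCnt (l : List String) (d : String → Nat) (x : String) :
    x ∈ dropCnt d l ↔ d x < l.count x := by
  rw [← List.count_pos_iff, count_dropCnt]; omega

theorem remove?_dropCnt (l : List String) : ∀ (d : String → Nat) (x : String),
    d x < l.count x →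
    PySem.List.remove? (dropCnt d l) x
      = some (dropCnt (fun y => if y = x then d y + 1 else d y) l) := by
  induction l with
  | nil => intro d x h; simp at h
  | cons a xs ih =>
    intro d x h
    by_cases ha : d a = 0
    · rw [dropCnt_cons_zero xs ha]
      by_cases hax : a = x
      · subst hax
        rw [PySem.List.remove?_cons_self]
        have h1 : dropCnt (fun y => if y = a then d y + 1 else d y) (a :: xs)
            = dropCnt d xs := by
          rw [dropCnt_cons_pos xs (by simp)]
          apply dropCnt_congr
          funext y; by_cases hy : y = a <;> simp [hy, ha]
        rw [h1]
      · rw [PySem.List.remove?_cons_of_ne (dropCnt d xs) hax]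
        have hcnt : d x < xs.count x := by
          rwa [List.count_cons_of_ne hax] at h
        rw [ih d x hcnt]
        have h1 : dropCnt (fun y => if y = x then d y + 1 else d y) (a :: xs)
            = a :: dropCnt (fun y => if y = x then d y + 1 else d y) xs := by
          rw [dropCnt_cons_zero xs (by simp [hax, ha])]
        rw [h1]
        rfl
    · rw [dropCnt_cons_pos xs ha]
      have hcnt : (if x = a then d a - 1 else d x) < xs.count x := by
        by_cases hx : x = a
        · rw [if_pos hx]
          subst hx
          rw [List.count_cons_self] at h
          omega
        · rw [if_neg hx]
          have hb : a ≠ x := fun he => hx he.symm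
          rwa [List.count_cons_of_ne hb] at h
      rw [ih _ x hcnt]
      congr 1
      have hne : (if a = x then d a + 1 else d a) ≠ 0 := by
        by_cases hax : a = x
        · rw [if_pos hax]; omega
        · rw [if_neg hax]; exact ha
      rw [dropCnt_cons_pos xs hne]
      apply dropCnt_congr
      funext y
      by_cases hy : y = a
      · subst hy
        by_cases hyx : y = x
        · subst hyx; rw [if_pos rfl, if_pos rfl, if_pos rfl, if_pos rfl]; omega
        · rw [if_pos rfl, if_neg hyx, if_neg hyx, if_pos rfl]
      · by_cases hyx : y = x
        · rw [if_pos hyx, if_neg hy, if_pos hyx, if_neg hy]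
        · rw [if_neg hyx, if_neg hy, if_neg hyx, if_neg hy]

-- the drop-count function A has accumulated after processing prefix p (against second list l2)
def dA (l2 p : List String) : String → Nat := fun ch => min (p.count ch) (l2.count ch)

-- A's loop invariant
theorem foldA_inv (l1 l2 : List String) : ∀ (rest p : List String), l1 = p ++ rest →
    rest.foldl
      (fun (st : List String × List String) letter =>
        if letter ∈ st.2 then
          ((PySem.List.remove? st.1 letter).getD st.1,
           (PySem.List.remove? st.2 letter).getD st.2)
        else st)
      (dropCnt (dA l2 p) l1, dropCnt (dA l2 p) l2)
    = (dropCnt (dA l2 l1) l1, dropCnt (dA l2 l1) l2) := by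
  intro rest
  induction rest with
  | nil => intro p hp; simp at hp; rw [hp]; rfl
  | cons x rest' ih =>
    intro p hp
    rw [List.foldl_cons]
    have hcnt1 : (p ++ [x]).count x ≤ l1.count x := by
      rw [hp]; simp [List.count_append]
    have step :
        (if x ∈ dropCnt (dA l2 p) l2 then
          ((PySem.List.remove? (dropCnt (dA l2 p) l1) x).getD (dropCnt (dA l2 p) l1),
           (PySem.List.remove? (dropCnt (dA l2 p) l2) x).getD (dropCnt (dA l2 p) l2))
        else (dropCnt (dA l2 p) l1, dropCnt (dA l2 p) l2))
        = (dropCnt (dA l2 (p ++ [x])) l1, dropCnt (dA l2 (p ++ [x])) l2) := by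
      by_cases hm : x ∈ dropCnt (dA l2 p) l2
      · rw [if_pos hm]
        have hx2 : p.count x < l2.count x := by
          have := (mem_dropCnt l2 (dA l2 p) x).mp hm
          simp [dA] at this; omega
        have hd2 : dA l2 p x < l2.count x := by simp [dA]; omega
        have hd1 : dA l2 p x < l1.count x := by
          simp [dA]
          have : p.count x + 1 ≤ l1.count x := by
            simpa [List.count_append] using hcnt1
          omega
        rw [remove?_dropCnt l1 _ x hd1, remove?_dropCnt l2 _ x hd2]
        have hfun : (fun y => if y = x then dA l2 p y + 1 else dA l2 p y)
            = dA l2 (p ++ [x]) := by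
          funext y
          by_cases hy : y = x
          · subst hy; simp [dA, List.count_append]; omega
          · have hxy : ¬ x = y := fun he => hy he.symm
            simp [dA, List.count_append, hxy, hy]
        simp [hfun]
      · rw [if_neg hm]
        have hx2 : ¬ p.count x < l2.count x := by
          intro hc
          exact hm ((mem_dropCnt l2 (dA l2 p) x).mpr (by simp [dA]; omega))
        have hfun : dA l2 (p ++ [x]) = dA l2 p := by
          funext y
          by_cases hy : y = x
          · subst hy; simp [dA, List.count_append]; omega
          · have hxy : ¬ x = y := fun he => hy he.symm
            simp [dA, List.count_append, hxy, hy]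
        rw [hfun]
    rw [step]
    exact ih (p ++ [x]) (by rw [hp]; simp)

-- a dict built by inserting key-determined values over a key list
theorem getD_foldl_insert_fun (g : String → Int) (d0 : PySem.Dict String Int) :
    ∀ (ks : List String) (ch : String),
    (ks.foldl (fun d k => d.insert k (g k)) d0).getD ch 0
      = if ch ∈ ks then g ch else d0.getD ch 0 := by
  intro ks
  induction ks generalizing d0 with
  | nil => intro ch; simp
  | cons k ks ih =>
    intro ch
    rw [List.foldl_cons, ih]
    by_cases hk : ch ∈ ks
    · simp [hk]
    · rw [if_neg hk, PySem.Dict.getD_insert]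
      by_cases he : ch = k <;> simp [he, hk]

theorem getD_pvCountB (name : String) (ch : String) :
    (pvCountB name).getD ch 0
      = ((name.toList.map (fun c => String.ofList [c])).count ch : Int) := by
  unfold pvCountB
  rw [PySem.Dict.getD_foldl_insert_add_one]
  simp

-- the common dict holds exactly the per-letter overlap min-counts
theorem getD_common (name1 name2 : String) (ch : String) :
    ((pvCountB name1).items.foldl
      (fun (d : PySem.Dict String Int) p =>
        d.insert p.1 (min p.2 ((pvCountB name2).getD p.1 0)))
      PySem.Dict.empty).getD ch 0
    = ((min ((name1.toList.map (fun c => String.ofList [c])).count ch)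
            ((name2.toList.map (fun c => String.ofList [c])).count ch) : Nat) : Int) := by
  have hc1 : pvCountB name1
      = PySem.Dict.counter (name1.toList.map (fun c => String.ofList [c])) := by
    unfold pvCountB
    rw [PySem.Dict.foldl_insert_getD_add_one_eq_counter]
  rw [hc1, PySem.Dict.items_counter, List.foldl_map]
  rw [getD_foldl_insert_fun
    (fun k => min ((name1.toList.map (fun c => String.ofList [c])).count k : Int)
                  ((pvCountB name2).getD k 0)) PySem.Dict.empty _ ch]
  by_cases hm : ch ∈ PySem.Set.ofList (name1.toList.map (fun c => String.ofList [c]))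
  · rw [if_pos hm, getD_pvCountB]
    push_cast
    rfl
  · rw [if_neg hm]
    have : ch ∉ (name1.toList.map (fun c => String.ofList [c])) := by
      intro hc; exact hm (by rwa [PySem.Set.mem_ofList])
    rw [List.count_eq_zero_of_not_mem this]
    simp

-- B's scan with drop budgets computes dropCnt
theorem passB_inv (l : List String) : ∀ (dr : PySem.Dict String Int)
    (f : String → Nat) (out : List String),
    (∀ ch, dr.getD ch 0 = ((f ch : Nat) : Int)) →
    (l.foldl
      (fun (st : PySem.Dict String Int × List String) ch =>
        if st.1.getD ch 0 > 0 then (st.1.insert ch (st.1.getD ch 0 - 1), st.2)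
        else (st.1, st.2 ++ [ch]))
      (dr, out)).2 = out ++ dropCnt f l := by
  induction l with
  | nil => intro dr f out _; simp [dropCnt]
  | cons x xs ih =>
    intro dr f out hrep
    rw [List.foldl_cons]
    by_cases hz : f x = 0
    · rw [if_neg (by rw [hrep x, hz]; simp)]
      rw [ih dr f (out ++ [x]) hrep]
      simp [dropCnt, hz]
    · rw [if_pos (by rw [hrep x]; exact_mod_cast Nat.pos_of_ne_zero hz)]
      have hrep' : ∀ ch, (dr.insert x (dr.getD x 0 - 1)).getD ch 0
          = (((fun y => if y = x then f x - 1 else f y) ch : Nat) : Int) := by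
        intro ch
        show (dr.insert x (dr.getD x 0 - 1)).getD ch 0
            = ((if ch = x then f x - 1 else f ch : Nat) : Int)
        rw [PySem.Dict.getD_insert]
        by_cases he : ch = x
        · rw [if_pos he, if_pos he, hrep x]
          have := Nat.pos_of_ne_zero hz
          omega
        · rw [if_neg he, if_neg he, hrep ch]
      rw [ih _ (fun y => if y = x then f x - 1 else f y) out hrep']
      simp [dropCnt, hz]

-- ===== VERDICT (by name: the statement is the Claim_ definition above) =====
theorem remove_common_letters_spec : Claim_equal_remove_common_letters := by
  intro name1 name2 _
  unfold Spec_remove_common_letters remove_common_letters remove_common_letters_alt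
  set l1 := name1.toList.map (fun c => String.ofList [c]) with hl1
  set l2 := name2.toList.map (fun c => String.ofList [c]) with hl2
  have hA := foldA_inv l1 l2 l1 [] (by simp)
  have hd0 : dA l2 [] = fun _ => 0 := by funext y; simp [dA]
  have hdrop0 : ∀ (l : List String), dropCnt (fun _ => 0) l = l := by
    intro l; induction l with
    | nil => rfl
    | cons a xs ihh => simp [dropCnt, ihh]
  rw [hd0] at hA
  rw [hdrop0 l1, hdrop0 l2] at hA
  simp only []
  rw [hA]
  set m : String → Nat := fun ch => min (l1.count ch) (l2.count ch) with hm
  have hmA : dA l2 l1 = m := by funext y; simp [dA, hm]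
  rw [hmA]
  have hrep : ∀ ch, ((pvCountB name1).items.foldl
      (fun (d : PySem.Dict String Int) p =>
        d.insert p.1 (min p.2 ((pvCountB name2).getD p.1 0)))
      PySem.Dict.empty).getD ch 0 = ((m ch : Nat) : Int) := by
    intro ch; rw [getD_common name1 name2 ch]
  unfold pvPassB
  rw [passB_inv l1 _ m [] hrep, List.nil_append, passB_inv l2 _ m _ hrep]
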